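-- pv_equiv track=rewrite | github.com/AtharvaChiplunkar12/Coding-Practice | string/3110.py | scoreOfString
-- ===== SOURCE A (Python) =====
-- def scoreOfString(s: str) -> int:
--     score = 0
--     prev = ord(s[0])
--     i = 1
--     while i < len(s):
--         while i < len(s) and s[i-1] == s[i]:
--             i+=1
--         if i < len(s):
--             score += abs(prev - ord(s[i]))
--             prev = ord(s[i])
--             i+=1
--     return score
-- ===== SOURCE B (Python) =====
-- def scoreOfString(s: str) -> int:
--     # Run-skipping is unnecessary: equal adjacent characters contribute 0,
--     # so the score is simply the sum of |ord difference| over ALL adjacent pairs.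
--     return sum(abs(ord(a) - ord(b)) for a, b in zip(s, s[1:]))
-- ===== Notes on version B (the rewrite author's own statement) =====
-- stated objective: simpler
-- what changed: Drops A's nested-while run-skipping and prev tracking entirely: since equal adjacent characters contribute 0, the score equals the plain sum of absolute ord differences over all adjacent pairs (one zip/sum expression).
import Mathlib
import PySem

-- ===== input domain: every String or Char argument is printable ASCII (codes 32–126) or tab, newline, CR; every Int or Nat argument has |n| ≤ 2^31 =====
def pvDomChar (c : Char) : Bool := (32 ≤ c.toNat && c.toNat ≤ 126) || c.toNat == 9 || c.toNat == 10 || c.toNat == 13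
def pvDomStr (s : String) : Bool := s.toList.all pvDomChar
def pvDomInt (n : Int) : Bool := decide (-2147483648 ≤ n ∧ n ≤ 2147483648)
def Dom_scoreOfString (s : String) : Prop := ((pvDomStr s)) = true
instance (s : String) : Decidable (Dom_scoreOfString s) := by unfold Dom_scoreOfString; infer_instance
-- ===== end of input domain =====

-- B drops A's run-skipping and prev tracking: equal adjacent characters contribute 0, so the
-- score is the plain sum of absolute ord differences over all adjacent pairs (simpler).

-- ===== PORT A =====
-- A's interleaved whiles over state (score, prev, i), as structural recursion on the suffix
-- 'drop i' with d = s[i-1]: the first branch is the inner 'while s[i-1] == s[i]: i += 1',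
-- the second the outer body 'score += abs(prev - ord(s[i])); prev = ord(s[i]); i += 1'.
def pvALoop (score prev : Int) (d : Char) : List Char → Int
  | [] => score
  | c :: t =>
    if c = d then pvALoop score prev c t
    else pvALoop (score + |prev - (c.toNat : Int)|) ((c.toNat : Int)) c t

def scoreOfString (s : String) : Int :=
  let cs := s.toList
  -- prev = ord(s[0]); Python raises IndexError on the empty string, excluded by Pre_
  pvALoop 0 (((cs.headD ' ').toNat : Int)) (cs.headD ' ') (cs.drop 1)

-- ===== PORT B =====
-- 'sum(abs(ord(a) - ord(b)) for a, b in zip(s, s[1:]))'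
def scoreOfString_alt (s : String) : Int :=
  ((s.toList.zip (s.toList.drop 1)).map
    (fun p => |(p.1.toNat : Int) - (p.2.toNat : Int)|)).sum

-- ===== PRECONDITION & SPEC =====
-- Pre_ excludes exactly the empty string, on which A raises IndexError (s[0]).
def Pre_scoreOfString (s : String) : Prop := s ≠ ""
instance (s : String) : Decidable (Pre_scoreOfString s) := by unfold Pre_scoreOfString; infer_instance

def pvWitness_scoreOfString : String := "abba"

def Spec_scoreOfString (s : String) (out : Int) : Prop := out = scoreOfString_alt s
instance (s : String) (out : Int) : Decidable (Spec_scoreOfString s out) := by unfold Spec_scoreOfString; infer_instance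

-- ===== CLAIM (what is proved, stated in full; the proofs are below) =====
def Claim_equal_scoreOfString : Prop := ∀ (s : String), Dom_scoreOfString s → Pre_scoreOfString s → Spec_scoreOfString s (scoreOfString s)

-- ===== LEMMAS AND PROOFS =====

-- B's pairwise sum, in recursive form (previous char d, remaining chars t)
def pvPairSum (d : Char) : List Char → Int
  | [] => 0
  | c :: t => |(d.toNat : Int) - (c.toNat : Int)| + pvPairSum c t

-- A's invariant: prev always equals ord d, and then the loop adds the plain pairwise sum
-- (on the skip branch c = d, so the skipped pair contributes |d - c| = 0)
theorem pvALoop_eq (t : List Char) : ∀ (d : Char) (score : Int),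
    pvALoop score ((d.toNat : Int)) d t = score + pvPairSum d t := by
  induction t with
  | nil => intro d score; simp [pvALoop, pvPairSum]
  | cons c t ih =>
    intro d score
    by_cases hcd : c = d
    · subst hcd
      simp [pvALoop, pvPairSum, ih]
    · simp only [pvALoop, pvPairSum, if_neg hcd]
      rw [ih]
      ring

-- B's zip/map/sum equals the recursive pairwise sum
theorem pvZipSum_eq (t : List Char) : ∀ (d : Char),
    (((d :: t).zip t).map (fun p => |(p.1.toNat : Int) - (p.2.toNat : Int)|)).sum
      = pvPairSum d t := by
  induction t with
  | nil => intro d; rfl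
  | cons c t ih =>
    intro d
    simp only [List.zip_cons_cons, List.map, List.sum_cons, pvPairSum]
    rw [ih c]

-- ===== VERDICT (by name: the statement is the Claim_ definition above) =====
theorem scoreOfString_spec : Claim_equal_scoreOfString := by
  intro s _ hpre
  unfold Spec_scoreOfString scoreOfString scoreOfString_alt
  rcases hcs : s.toList with _ | ⟨c, rest⟩
  · exact absurd (String.toList_eq_nil_iff.mp hcs) hpre
  · simp only [List.headD, List.drop_succ_cons, List.drop_zero]
    rw [pvALoop_eq, pvZipSum_eq]
    simp
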